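-- pv_equiv track=rewrite | github.com/hcyogeesh/codemind-python | Spy_Number.py | checkSpy
-- ===== SOURCE A (Python) =====
-- def checkSpy(num):
-- 	sums = 0
-- 	product = 1
-- 	while num>0:
-- 		digit = num % 10
-- 		sums = sums + digit
-- 		product = product * digit
-- 		num = num // 10
--
-- 	if sums == product:
-- 		return True
-- 	else:
-- 		return False
-- ===== SOURCE B (Python) =====
-- def checkSpy(num):
--     if num <= 0:
--         return False
--     digits = [ord(c) - 48 for c in str(num)]
--     product = 1
--     for d in digits:
--         product *= d
--     return sum(digits) == product
-- ===== Notes on version B (the rewrite author's own statement) =====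
-- stated objective: idiomatic
-- what changed: B guards nonpositive inputs, materializes the digit list from the decimal string (str/ord) instead of A's simultaneous modulo/floordiv arithmetic loop, then compares two separate reductions (sum vs product).
import Mathlib
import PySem

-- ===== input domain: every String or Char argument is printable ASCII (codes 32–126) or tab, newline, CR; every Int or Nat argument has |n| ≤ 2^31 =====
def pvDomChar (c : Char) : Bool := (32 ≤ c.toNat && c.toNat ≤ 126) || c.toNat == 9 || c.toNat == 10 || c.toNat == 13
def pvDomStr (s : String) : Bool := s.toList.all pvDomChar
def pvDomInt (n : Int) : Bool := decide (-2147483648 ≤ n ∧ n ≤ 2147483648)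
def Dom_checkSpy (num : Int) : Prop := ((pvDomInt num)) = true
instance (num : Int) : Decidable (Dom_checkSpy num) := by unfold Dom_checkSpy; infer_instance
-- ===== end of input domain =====

-- B replaces A's simultaneous modulo/floordiv accumulation loop by a nonpositive-input guard, a digit
-- list read off the decimal string, and two separate reductions (sum vs product); objective: idiomatic.

-- ===== PORT A =====
-- the while loop: state (num, sums, product)
def checkSpyGo (num sums product : Int) : Int × Int :=
  if 0 < num then
    let digit := PySem.Int.mod num 10
    checkSpyGo (PySem.Int.floordiv num 10) (sums + digit) (product * digit)
  else (sums, product)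
termination_by num.toNat
decreasing_by
  simp only [PySem.Int.floordiv_eq_ediv_of_pos (by omega : (0:Int) < 10)]
  omega

def checkSpy (num : Int) : Bool :=
  let r := checkSpyGo num 0 1
  r.1 == r.2

-- ===== PORT B =====
def checkSpy_alt (num : Int) : Bool :=
  if num ≤ 0 then false
  else
    let digits := (PySem.Int.toChars num).map (fun c => ((c.toNat : Int) - 48))
    let product := digits.foldl (fun acc d => acc * d) 1
    digits.sum == product

-- ===== PRECONDITION & SPEC =====
def Spec_checkSpy (num : Int) (out : Bool) : Prop := out = checkSpy_alt num
instance (num : Int) (out : Bool) : Decidable (Spec_checkSpy num out) := by unfold Spec_checkSpy; infer_instance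

-- ===== CLAIM (what is proved, stated in full; the proofs are below) =====
def Claim_equal_checkSpy : Prop := ∀ (num : Int), Dom_checkSpy num → Spec_checkSpy num (checkSpy num)

-- ===== LEMMAS AND PROOFS =====

-- decimal digit characters of m (most significant first), as Nat.toDigits produces for m > 0
def pvDigitsChars (m : Nat) : List Char :=
  if m < 10 then [Nat.digitChar m]
  else pvDigitsChars (m / 10) ++ [Nat.digitChar (m % 10)]
termination_by m
decreasing_by omega

-- decimal digit values of m (most significant first)
def pvDigitsVals (m : Nat) : List Int :=
  if m < 10 then [(m : Int)]
  else pvDigitsVals (m / 10) ++ [((m % 10 : Nat) : Int)]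
termination_by m
decreasing_by omega

lemma pv_toDigitsCore_eq (f : Nat) : ∀ (m : Nat) (acc : List Char), m < f →
    Nat.toDigitsCore 10 f m acc = pvDigitsChars m ++ acc := by
  induction f with
  | zero => intro m acc h; omega
  | succ f ih =>
    intro m acc h
    rw [Nat.toDigitsCore]
    by_cases h10 : m < 10
    · have hz : m / 10 = 0 := by omega
      simp [hz, pvDigitsChars, h10, Nat.mod_eq_of_lt h10]
    · have hnz : ¬ m / 10 = 0 := by omega
      simp only [hnz, if_false]
      rw [ih (m / 10) _ (by omega)]
      conv_rhs => rw [pvDigitsChars]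
      simp [h10]

lemma pv_digitChar_val (d : Nat) (h : d < 10) :
    ((Nat.digitChar d).toNat : Int) - 48 = (d : Int) := by
  interval_cases d <;> decide

lemma pv_map_val_digitsChars (m : Nat) :
    (pvDigitsChars m).map (fun c => ((c.toNat : Int) - 48)) = pvDigitsVals m := by
  induction m using Nat.strong_induction_on with
  | _ m ih =>
    rw [pvDigitsChars, pvDigitsVals]
    by_cases h10 : m < 10
    · simp [h10, pv_digitChar_val m h10]
    · simp only [h10, if_false, List.map_append, List.map_cons, List.map_nil]
      rw [ih (m / 10) (by omega)]
      simp [pv_digitChar_val (m % 10) (by omega)]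

lemma pv_go_eq (m : Nat) : ∀ (s p : Int), 0 < m →
    checkSpyGo (m : Int) s p = (s + (pvDigitsVals m).sum, p * (pvDigitsVals m).prod) := by
  induction m using Nat.strong_induction_on with
  | _ m ih =>
    intro s p hm
    rw [checkSpyGo]
    have hpos : (0 : Int) < (m : Int) := by exact_mod_cast hm
    have hmod : PySem.Int.mod (m : Int) 10 = ((m % 10 : Nat) : Int) := by
      rw [PySem.Int.mod_eq_emod_of_pos (by omega)]
      push_cast; rfl
    have hdiv : PySem.Int.floordiv (m : Int) 10 = ((m / 10 : Nat) : Int) := by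
      rw [PySem.Int.floordiv_eq_ediv_of_pos (by omega)]
      push_cast; rfl
    simp only [hpos, if_true, hmod, hdiv]
    by_cases h10 : m < 10
    · have hz : m / 10 = 0 := by omega
      rw [hz]
      rw [checkSpyGo]
      rw [pvDigitsVals]
      simp [h10, Nat.mod_eq_of_lt h10]
    · rw [ih (m / 10) (by omega) _ _ (by omega)]
      conv_rhs => rw [pvDigitsVals]
      simp only [h10, if_false, List.sum_append, List.prod_append, List.sum_cons,
        List.prod_cons, List.sum_nil, List.prod_nil, Prod.mk.injEq]
      constructor <;> ring

lemma pv_foldl_mul (l : List Int) : l.foldl (fun acc d => acc * d) 1 = l.prod := by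
  rw [List.prod_eq_foldl]

-- ===== VERDICT (by name: the statement is the Claim_ definition above) =====
theorem checkSpy_spec : Claim_equal_checkSpy := by
  intro num _
  unfold Spec_checkSpy checkSpy checkSpy_alt
  by_cases hle : num ≤ 0
  · rw [checkSpyGo]
    simp [hle, show ¬ (0 : Int) < num by omega]
  · have hpos : 0 < num := by omega
    have hcast : ((num.toNat : Nat) : Int) = num := Int.toNat_of_nonneg (by omega)
    have hm : 0 < num.toNat := by omega
    have hgo := pv_go_eq num.toNat 0 1 hm
    rw [hcast] at hgo
    have hchars : PySem.Int.toChars num = pvDigitsChars num.toNat := by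
      unfold PySem.Int.toChars
      rw [if_neg (by omega)]
      unfold Nat.toDigits
      rw [pv_toDigitsCore_eq (num.toNat + 1) num.toNat [] (by omega)]
      simp
    simp only [hle, if_false, hgo, hchars, pv_map_val_digitsChars, pv_foldl_mul]
    simp
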